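-- pv_equiv track=rewrite | github.com/petertle22/CSCI_665_AlgorithmsHW | Exam1Playground/PlaygroundExam1.py | binarySearchForLatestFinishingInterval
-- ===== SOURCE A (Python) =====
-- def binarySearchForLatestFinishingInterval(left, right, intervals, j):
--     if left == right and intervals[left][1] <= intervals[j][0]:
--         return left
--     if left >= right:
--         return -1
--     mid = (left + right) // 2
--     (smid, fmid) = intervals[mid]
--     (sfind, ffind) = intervals[j]
--     if fmid <= sfind:
--         return max(binarySearchForLatestFinishingInterval(mid + 1, right, intervals, j), mid)
--     else:
--         return binarySearchForLatestFinishingInterval(left, mid - 1, intervals, j)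
-- ===== SOURCE B (Python) =====
-- def binarySearchForLatestFinishingInterval(left, right, intervals, j):
--     best = -1
--     while left <= right:
--         mid = (left + right) // 2
--         (smid, fmid) = intervals[mid]
--         (sfind, ffind) = intervals[j]
--         if fmid <= sfind:
--             if mid > best:
--                 best = mid
--             left = mid + 1
--         else:
--             right = mid - 1
--     return best
-- ===== Notes on version B (the rewrite author's own statement) =====
-- stated objective: alternative
-- what changed: Replaces the recursive binary search (max accumulated over the recursion, separate single-element base case) by an iterative while-loop that keeps a running best index and narrows [left,right] in place.
-- outside the precondition, e.g. on binarySearchForLatestFinishingInterval(-2, -2, [(5, -3), (-3, -3)], -1): A returns -2, B returns -1; on binarySearchForLatestFinishingInterval(0, 2, [(5, 6)], 0): A raises IndexError, B raises IndexError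
import Mathlib
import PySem

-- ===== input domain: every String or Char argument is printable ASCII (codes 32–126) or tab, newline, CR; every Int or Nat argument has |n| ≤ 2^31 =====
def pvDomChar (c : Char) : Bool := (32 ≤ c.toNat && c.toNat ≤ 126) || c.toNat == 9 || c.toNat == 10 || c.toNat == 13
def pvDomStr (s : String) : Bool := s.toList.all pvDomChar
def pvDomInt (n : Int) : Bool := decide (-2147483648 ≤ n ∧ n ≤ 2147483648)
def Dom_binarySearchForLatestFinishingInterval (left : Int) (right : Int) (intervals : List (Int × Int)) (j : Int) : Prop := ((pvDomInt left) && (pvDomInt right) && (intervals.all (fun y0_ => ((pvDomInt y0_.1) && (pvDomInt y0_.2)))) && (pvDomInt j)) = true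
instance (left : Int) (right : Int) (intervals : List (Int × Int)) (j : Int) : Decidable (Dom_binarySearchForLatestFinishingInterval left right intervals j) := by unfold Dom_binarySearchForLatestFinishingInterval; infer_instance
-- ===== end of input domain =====

-- B replaces A's recursive binary search (max folded over the recursion, special
-- single-element base case) by an iterative loop carrying a running best index; same cost.

-- ===== PORT A =====
-- literal transliteration of A's recursion; pyGet? = Python indexing (negative wraps,
-- none = IndexError, which Pre_ excludes; the `none` fallback value -1 is never claimed about)
def binarySearchForLatestFinishingInterval (left : Int) (right : Int) (intervals : List (Int × Int)) (j : Int) : Int :=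
  if left == right &&
      (match PySem.List.pyGet? intervals left, PySem.List.pyGet? intervals j with
       | some pl, some pj => decide (pl.2 ≤ pj.1)
       | _, _ => false) then
    left
  else if left ≥ right then
    -1
  else
    let mid := PySem.Int.floordiv (left + right) 2
    match PySem.List.pyGet? intervals mid, PySem.List.pyGet? intervals j with
    | some (_smid, fmid), some (sfind, _ffind) =>
        if fmid ≤ sfind then
          max (binarySearchForLatestFinishingInterval (mid + 1) right intervals j) mid
        else
          binarySearchForLatestFinishingInterval left (mid - 1) intervals j
    | _, _ => -1  -- IndexError in Python (outside Pre_)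
termination_by (right - left + 1).toNat
decreasing_by
  · have hb := PySem.Int.floordiv_two_mid_bounds (lo := left) (hi := right) (by omega)
    omega
  · have hb := PySem.Int.floordiv_two_mid_bounds (lo := left) (hi := right) (by omega)
    omega

-- ===== PORT B =====
-- the while-loop of Source B as tail recursion over (left, right, best)
def bsAltLoop (left : Int) (right : Int) (intervals : List (Int × Int)) (j : Int) (best : Int) : Int :=
  if left ≤ right then
    let mid := PySem.Int.floordiv (left + right) 2
    match PySem.List.pyGet? intervals mid with
    | none => best  -- IndexError in Python (outside Pre_)
    | some (_smid, fmid) =>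
      match PySem.List.pyGet? intervals j with
      | none => best  -- IndexError in Python (outside Pre_)
      | some (sfind, _ffind) =>
        if fmid ≤ sfind then
          bsAltLoop (mid + 1) right intervals j (if mid > best then mid else best)
        else
          bsAltLoop left (mid - 1) intervals j best
  else
    best
termination_by (right - left + 1).toNat
decreasing_by
  · have hb := PySem.Int.floordiv_two_mid_bounds (lo := left) (hi := right) (by omega)
    omega
  · have hb := PySem.Int.floordiv_two_mid_bounds (lo := left) (hi := right) (by omega)
    omega

def binarySearchForLatestFinishingInterval_alt (left : Int) (right : Int) (intervals : List (Int × Int)) (j : Int) : Int :=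
  bsAltLoop left right intervals j (-1)

-- ===== PRECONDITION & SPEC =====
-- Pre_ restricts to the natural binary-search domain: either the empty range left > right
-- (A returns -1 without touching the list) or 0 ≤ left with right and j in range.  It
-- excludes out-of-range indices, where A raises IndexError, and negative left with
-- left ≤ right, where Python's negative-index wraparound makes A return wrapped
-- pseudo-indices (e.g. `left` itself at the base case) — an accident of indexing.
def Pre_binarySearchForLatestFinishingInterval (left : Int) (right : Int) (intervals : List (Int × Int)) (j : Int) : Prop :=
  left > right ∨
    (0 ≤ left ∧ right < (intervals.length : Int) ∧
      -(intervals.length : Int) ≤ j ∧ j < (intervals.length : Int))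
instance (left : Int) (right : Int) (intervals : List (Int × Int)) (j : Int) : Decidable (Pre_binarySearchForLatestFinishingInterval left right intervals j) := by unfold Pre_binarySearchForLatestFinishingInterval; infer_instance

def pvWitness_binarySearchForLatestFinishingInterval : Int × Int × (List (Int × Int)) × Int := (0, 2, [(0, 1), (2, 3), (5, 6)], 2)

def Spec_binarySearchForLatestFinishingInterval (left : Int) (right : Int) (intervals : List (Int × Int)) (j : Int) (out : Int) : Prop := out = binarySearchForLatestFinishingInterval_alt left right intervals j
instance (left : Int) (right : Int) (intervals : List (Int × Int)) (j : Int) (out : Int) : Decidable (Spec_binarySearchForLatestFinishingInterval left right intervals j out) := by unfold Spec_binarySearchForLatestFinishingInterval; infer_instance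

-- ===== CLAIM (what is proved, stated in full; the proofs are below) =====
def Claim_equal_binarySearchForLatestFinishingInterval : Prop := ∀ (left : Int) (right : Int) (intervals : List (Int × Int)) (j : Int), Dom_binarySearchForLatestFinishingInterval left right intervals j → Pre_binarySearchForLatestFinishingInterval left right intervals j → Spec_binarySearchForLatestFinishingInterval left right intervals j (binarySearchForLatestFinishingInterval left right intervals j)

-- ===== LEMMAS AND PROOFS =====

theorem bsAltLoop_of_gt (left right : Int) (intervals : List (Int × Int)) (j best : Int)
    (h : right < left) : bsAltLoop left right intervals j best = best := by
  rw [bsAltLoop, if_neg (by omega)]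

-- main invariant: inside the natural domain A's result is ≥ -1 and the loop with
-- accumulator best ≥ -1 computes max best (A left right intervals j)
theorem bsAltLoop_eq (n : Nat) : ∀ (left right : Int) (intervals : List (Int × Int)) (j best : Int),
    (right - left + 1).toNat ≤ n →
    0 ≤ left → right < (intervals.length : Int) →
    -(intervals.length : Int) ≤ j → j < (intervals.length : Int) →
    -1 ≤ best →
    -1 ≤ binarySearchForLatestFinishingInterval left right intervals j ∧
      bsAltLoop left right intervals j best = max best (binarySearchForLatestFinishingInterval left right intervals j) := by
  induction n with
  | zero =>
      intro left right intervals j best hn hl hr hj1 hj2 hb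
      have hgt : right < left := by omega
      have hbeq : (left == right) = false := by simp only [beq_eq_false_iff_ne, ne_eq]; omega
      rw [bsAltLoop, binarySearchForLatestFinishingInterval]
      simp only [hbeq, Bool.false_and, Bool.false_eq_true, if_false]
      rw [if_neg (by omega : ¬ left ≤ right), if_pos (by omega : left ≥ right)]
      omega
  | succ m ih =>
      intro left right intervals j best hn hl hr hj1 hj2 hb
      by_cases hlr : left ≤ right
      · have hmid := PySem.Int.floordiv_two_mid_bounds (lo := left) (hi := right) hlr
        set mid := PySem.Int.floordiv (left + right) 2 with hmiddef
        have hmget : PySem.List.pyGet? intervals mid = some (intervals[mid.toNat]'(by omega)) :=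
          PySem.List.pyGet?_eq_some_getElem intervals (by omega) (by omega)
        have hjget : ∃ pj, PySem.List.pyGet? intervals j = some pj := by
          cases hpj : PySem.List.pyGet? intervals j with
          | none =>
              exfalso
              have := (PySem.List.pyGet?_eq_none_iff intervals j).1 hpj
              exact this ⟨by omega, by omega⟩
          | some pj => exact ⟨pj, rfl⟩
        obtain ⟨pj, hpj⟩ := hjget
        by_cases heq : left = right
        · -- single element: mid = left = right
          have hmidl : mid = left := by omega
          have hlget : PySem.List.pyGet? intervals left = some (intervals[left.toNat]'(by omega)) :=
            PySem.List.pyGet?_eq_some_getElem intervals (by omega) (by omega)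
          have hml : intervals[left.toNat]'(by omega) = intervals[mid.toNat]'(by omega) := by
            congr 1
            omega
          have hbeq : (left == right) = true := by simp only [beq_iff_eq]; omega
          rw [bsAltLoop, binarySearchForLatestFinishingInterval]
          simp only [if_pos hlr, ← hmiddef, hmget, hpj, hlget, hml, hbeq, Bool.true_and,
            List.get_eq_getElem, decide_eq_true_eq]
          by_cases hc : (intervals[mid.toNat]'(by omega)).2 ≤ pj.1
          · simp only [if_pos hc]
            rw [bsAltLoop_of_gt _ _ _ _ _ (by omega)]
            constructor
            · omega
            · rw [hmidl]; omega
          · simp only [if_neg hc]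
            rw [if_pos (by omega : left ≥ right), bsAltLoop_of_gt _ _ _ _ _ (by omega)]
            omega
        · -- left < right: both recurse
          have hltr : left < right := by omega
          have hbeq : (left == right) = false := by simp only [beq_eq_false_iff_ne, ne_eq]; omega
          rw [bsAltLoop, binarySearchForLatestFinishingInterval]
          simp only [if_pos hlr, ← hmiddef, hmget, hpj, hbeq, Bool.false_and, Bool.false_eq_true,
            if_false, List.get_eq_getElem]
          rw [if_neg (by omega : ¬ left ≥ right)]
          by_cases hc : (intervals[mid.toNat]'(by omega)).2 ≤ pj.1
          · simp only [if_pos hc]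
            obtain ⟨hA, hEq⟩ := ih (mid + 1) right intervals j
              (if mid > best then mid else best) (by omega) (by omega) hr hj1 hj2 (by omega)
            rw [hEq]
            omega
          · simp only [if_neg hc]
            exact ih left (mid - 1) intervals j best (by omega) hl (by omega) hj1 hj2 hb
      · -- empty range
        have hbeq : (left == right) = false := by simp only [beq_eq_false_iff_ne, ne_eq]; omega
        rw [bsAltLoop, binarySearchForLatestFinishingInterval]
        simp only [hbeq, Bool.false_and, Bool.false_eq_true, if_false]
        rw [if_neg hlr, if_pos (by omega : left ≥ right)]
        omega

-- ===== VERDICT (by name: the statement is the Claim_ definition above) =====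
theorem binarySearchForLatestFinishingInterval_spec : Claim_equal_binarySearchForLatestFinishingInterval := by
  intro left right intervals j _hdom hpre
  unfold Spec_binarySearchForLatestFinishingInterval binarySearchForLatestFinishingInterval_alt
  rcases hpre with hlr | ⟨hl, hr, hj1, hj2⟩
  · have hbeq : (left == right) = false := by simp only [beq_eq_false_iff_ne, ne_eq]; omega
    rw [bsAltLoop, binarySearchForLatestFinishingInterval]
    simp only [hbeq, Bool.false_and, Bool.false_eq_true, if_false]
    rw [if_pos (by omega : left ≥ right), if_neg (by omega : ¬ left ≤ right)]
  · obtain ⟨hA, hEq⟩ := bsAltLoop_eq ((right - left + 1).toNat) left right intervals j (-1)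
      le_rfl hl hr hj1 hj2 le_rfl
    rw [hEq]
    omega
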